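-- pv_equiv track=rewrite | github.com/Kirill-found/SheetGPT | test_localization.py | _clean_formula
-- ===== SOURCE A (Python) =====
-- def _clean_formula(formula: str) -> str:
--     """Удаляет лишние пробелы из формулы и локализует для русской версии Google Sheets"""
--     # Удаляем пробелы вокруг операторов
--     formula = formula.replace(" >", ">").replace("> ", ">")
--     formula = formula.replace(" <", "<").replace("< ", "<")
--     formula = formula.replace(" =", "=").replace("= ", "=")
--     formula = formula.replace(" ,", ",").replace(", ", ",")
--     formula = formula.replace(" )", ")").replace("( ", "(")
--
--     # Удаляем множественные пробелы
--     while "  " in formula: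
--         formula = formula.replace("  ", "")
--
--     # ЛОКАЛИЗАЦИЯ: Заменяем запятые на точки с запятой для русской версии Google Sheets
--     # Обрабатываем умно: не трогаем запятые внутри строковых литералов
--     result = []
--     in_string = False
--
--     for i, char in enumerate(formula):
--         # Отслеживаем вход/выход из строковых литералов
--         if char == '"':
--             in_string = not in_string
--             result.append(char)
--         # Заменяем запятые на точки с запятой только вне строк
--         elif char == ',' and not in_string:
--             result.append(';')
--         else:
--             result.append(char)
--
--     return ''.join(result)
-- ===== SOURCE B (Python) =====
-- def _clean_formula(formula: str) -> str:
--     """Удаляет лишние пробелы из формулы и локализует для русской версии Google Sheets"""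
--     # Пробелы вокруг операторов: таблица правил вместо развёрнутой цепочки replace
--     for pat, rep in ((" >", ">"), ("> ", ">"),
--                      (" <", "<"), ("< ", "<"),
--                      (" =", "="), ("= ", "="),
--                      (" ,", ","), (", ", ","),
--                      (" )", ")"), ("( ", "(")):
--         formula = formula.replace(pat, rep)
--
--     # Удаляем множественные пробелы
--     while "  " in formula:
--         formula = formula.replace("  ", "")
--
--     # Локализация: split on '"' — чётные части вне строковых литералов,
--     # нечётные внутри; запятые меняем на ';' только в чётных частях и
--     # склеиваем обратно '"'. Та же toggle-семантика, что и флаг in_string,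
--     # в том числе при нечётном числе кавычек.
--     parts = formula.split('"')
--     return '"'.join(p.replace(",", ";") if i % 2 == 0 else p
--                     for i, p in enumerate(parts))
-- ===== Notes on version B (the rewrite author's own statement) =====
-- stated objective: idiomatic
-- what changed: B replaces A's char-by-char in_string-flag scan by split-on-quote / replace commas in even-indexed parts / rejoin, and folds the operator-space cleanup over a table of (pattern, replacement) rules instead of A's hand-unrolled replace chain; the double-space while loop is kept.
import Mathlib
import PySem

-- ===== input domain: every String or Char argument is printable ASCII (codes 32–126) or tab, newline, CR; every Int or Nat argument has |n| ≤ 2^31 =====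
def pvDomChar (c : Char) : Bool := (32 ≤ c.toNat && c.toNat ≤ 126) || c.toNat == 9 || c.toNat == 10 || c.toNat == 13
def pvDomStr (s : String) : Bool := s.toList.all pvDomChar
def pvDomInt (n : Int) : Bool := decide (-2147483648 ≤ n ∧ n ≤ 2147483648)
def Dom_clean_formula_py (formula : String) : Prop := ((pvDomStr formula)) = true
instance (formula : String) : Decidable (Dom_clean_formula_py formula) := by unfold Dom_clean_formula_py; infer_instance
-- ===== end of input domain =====

-- B (idiomatic): the in_string-flag scan becomes split-on-quote / fix even parts / rejoin, and the
-- unrolled replace chain becomes a fold over a rule table; the double-space while loop is kept.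

-- ===== PORT A =====
-- the while '"  " in formula' loop; fuel cs.length + 1 is a totality guard only: each
-- iteration that fires removes at least two characters, so the fuel is never exhausted
def pvSqueezeA : Nat → List Char → List Char
  | 0, cs => cs
  | fuel + 1, cs =>
    if PySem.Chars.isIn [' ', ' '] cs then pvSqueezeA fuel (PySem.Chars.replace cs [' ', ' '] [])
    else cs

-- the body of A's for-loop over (in_string, result)
def pvStepA (st : Bool × List Char) (c : Char) : Bool × List Char :=
  if c = '"' then (!st.1, st.2 ++ [c])
  else if c = ',' && !st.1 then (st.1, st.2 ++ [';'])
  else (st.1, st.2 ++ [c])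

def clean_formula_py (formula : String) : String :=
  let cs0 := formula.toList
  let c1 := PySem.Chars.replace (PySem.Chars.replace cs0 [' ', '>'] ['>']) ['>', ' '] ['>']
  let c2 := PySem.Chars.replace (PySem.Chars.replace c1 [' ', '<'] ['<']) ['<', ' '] ['<']
  let c3 := PySem.Chars.replace (PySem.Chars.replace c2 [' ', '='] ['=']) ['=', ' '] ['=']
  let c4 := PySem.Chars.replace (PySem.Chars.replace c3 [' ', ','] [',']) [',', ' '] [',']
  let c5 := PySem.Chars.replace (PySem.Chars.replace c4 [' ', ')'] [')']) ['(', ' '] ['(']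
  let f := pvSqueezeA (c5.length + 1) c5
  String.ofList ((f.foldl pvStepA (false, [])).2)

-- ===== PORT B =====
-- B's rule table for the operator-space cleanup
def pvRules : List (List Char × List Char) :=
  [([' ', '>'], ['>']), (['>', ' '], ['>']),
   ([' ', '<'], ['<']), (['<', ' '], ['<']),
   ([' ', '='], ['=']), (['=', ' '], ['=']),
   ([' ', ','], [',']), ([',', ' '], [',']),
   ([' ', ')'], [')']), (['(', ' '], ['('])]

-- B's 'while "  " in formula' loop (fuel is a totality guard only, as in A's port)
def pvCollapseB : Nat → List Char → List Char
  | 0, cs => cs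
  | fuel + 1, cs =>
    if PySem.Chars.isIn [' ', ' '] cs then pvCollapseB fuel (PySem.Chars.replace cs [' ', ' '] [])
    else cs

def clean_formula_py_alt (formula : String) : String :=
  let r := pvRules.foldl (fun acc pr => PySem.Chars.replace acc pr.1 pr.2) formula.toList
  let f := pvCollapseB (r.length + 1) r
  let parts := PySem.Chars.splitOn f ['"']
  String.ofList (PySem.Chars.join ['"']
    (parts.mapIdx (fun i p => if i % 2 == 0 then PySem.Chars.replace p [','] [';'] else p)))

-- ===== PRECONDITION & SPEC =====
def Spec_clean_formula_py (formula : String) (out : String) : Prop := out = clean_formula_py_alt formula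
instance (formula : String) (out : String) : Decidable (Spec_clean_formula_py formula out) := by unfold Spec_clean_formula_py; infer_instance

-- ===== CLAIM (what is proved, stated in full; the proofs are below) =====
def Claim_equal_clean_formula_py : Prop := ∀ (formula : String), Dom_clean_formula_py formula → Spec_clean_formula_py formula (clean_formula_py formula)

-- ===== LEMMAS AND PROOFS =====

-- A's comma substitution on a single char
def pvSubst (c : Char) : Char := if c = ',' then ';' else c

-- head-recursive form of A's scan
def pvScanA : List Char → Bool → List Char
  | [], _ => []
  | c :: cs, b =>
    if c = '"' then '"' :: pvScanA cs (!b)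
    else if c = ',' && !b then ';' :: pvScanA cs b
    else c :: pvScanA cs b

-- structural form of formula.split('"')
def pvSplit : List Char → List (List Char)
  | [] => [[]]
  | c :: cs =>
    if c = '"' then [] :: pvSplit cs
    else
      match pvSplit cs with
      | [] => [[c]]
      | p :: ps => (c :: p) :: ps

-- alternating join: parts processed with a parity flag, rejoined with '"'
def pvGlue : Bool → List (List Char) → List Char
  | _, [] => []
  | b, [p] => if b then p else p.map pvSubst
  | b, p :: q :: ps => (if b then p else p.map pvSubst) ++ '"' :: pvGlue (!b) (q :: ps)

-- the two ports' prep phases coincide: B's fold unfolds to A's chain, and the squeeze loops are identical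
lemma pv_fold_rules (cs : List Char) :
    pvRules.foldl (fun acc pr => PySem.Chars.replace acc pr.1 pr.2) cs =
      PySem.Chars.replace (PySem.Chars.replace
        (PySem.Chars.replace (PySem.Chars.replace
          (PySem.Chars.replace (PySem.Chars.replace
            (PySem.Chars.replace (PySem.Chars.replace
              (PySem.Chars.replace (PySem.Chars.replace cs
                [' ', '>'] ['>']) ['>', ' '] ['>'])
              [' ', '<'] ['<']) ['<', ' '] ['<'])
            [' ', '='] ['=']) ['=', ' '] ['='])
          [' ', ','] [',']) [',', ' '] [','])
        [' ', ')'] [')']) ['(', ' '] ['('] := by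
  simp [pvRules]

lemma pv_collapse_eq_squeeze (fuel : Nat) (cs : List Char) :
    pvCollapseB fuel cs = pvSqueezeA fuel cs := by
  induction fuel generalizing cs with
  | zero => rfl
  | succ fuel ih => simp only [pvCollapseB, pvSqueezeA, ih]

lemma pvSplit_ne_nil (cs : List Char) : pvSplit cs ≠ [] := by
  induction cs with
  | nil => simp [pvSplit]
  | cons c cs ih =>
    simp only [pvSplit]
    split
    · simp
    · cases h : pvSplit cs <;> simp

lemma pv_replace_go_single (fuel : Nat) (l acc : List Char) (h : l.length ≤ fuel) :
    PySem.Chars.replace.go [','] [';'] fuel l acc = acc.reverse ++ l.map pvSubst := by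
  induction fuel generalizing l acc with
  | zero =>
    cases l with
    | nil => simp [PySem.Chars.replace.go]
    | cons c t => simp at h
  | succ fuel ih =>
    cases l with
    | nil => simp [PySem.Chars.replace.go]
    | cons c t =>
      have ht : t.length ≤ fuel := by simp only [List.length_cons] at h; omega
      simp only [PySem.Chars.replace.go]
      by_cases hc : c = ','
      · subst hc
        rw [if_pos (by simp [List.isPrefixOf])]
        rw [show List.drop [','].length (',' :: t) = t from rfl]
        rw [ih t ([';'].reverse ++ acc) ht]
        simp [pvSubst]
      · rw [if_neg (by simp [List.isPrefixOf]; exact fun h => hc h.symm)]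
        rw [ih t (c :: acc) ht]
        simp [pvSubst, hc]

lemma pv_replace_single (l : List Char) :
    PySem.Chars.replace l [','] [';'] = l.map pvSubst := by
  have := pv_replace_go_single l.length l [] (le_refl _)
  simpa [PySem.Chars.replace] using this

lemma pv_split_go_single (fuel : Nat) (l cur : List Char) (acc : List (List Char))
    (h : l.length ≤ fuel) :
    PySem.Chars.splitOn.go ['"'] fuel l cur acc =
      acc.reverse ++ (cur.reverse ++ (pvSplit l).headI) :: (pvSplit l).tail := by
  induction fuel generalizing l cur acc with
  | zero =>
    cases l with
    | nil => simp [PySem.Chars.splitOn.go, pvSplit]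
    | cons c t => simp at h
  | succ fuel ih =>
    cases l with
    | nil => simp [PySem.Chars.splitOn.go, pvSplit]
    | cons c t =>
      have ht : t.length ≤ fuel := by simp only [List.length_cons] at h; omega
      simp only [PySem.Chars.splitOn.go]
      by_cases hc : c = '"'
      · subst hc
        rw [if_pos (by simp [List.isPrefixOf])]
        rw [show List.drop ['"'].length ('"' :: t) = t from rfl]
        rw [ih t [] (cur.reverse :: acc) ht]
        rcases hsp : pvSplit t with _ | ⟨p, ps⟩
        · exact absurd hsp (pvSplit_ne_nil t)
        · simp [pvSplit, hsp]
      · rw [if_neg (by simp [List.isPrefixOf]; exact fun h => hc h.symm)]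
        rw [ih t (c :: cur) acc ht]
        rcases hsp : pvSplit t with _ | ⟨p, ps⟩
        · exact absurd hsp (pvSplit_ne_nil t)
        · simp [pvSplit, hc, hsp]

lemma pv_splitOn_single (l : List Char) :
    PySem.Chars.splitOn l ['"'] = pvSplit l := by
  have h := pv_split_go_single (l.length + 1) l [] [] (by omega)
  rcases hsp : pvSplit l with _ | ⟨p, ps⟩
  · exact absurd hsp (pvSplit_ne_nil l)
  · simpa [PySem.Chars.splitOn, hsp] using h

lemma pv_foldA (cs : List Char) (b : Bool) (acc : List Char) :
    (cs.foldl pvStepA (b, acc)).2 = acc ++ pvScanA cs b := by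
  induction cs generalizing b acc with
  | nil => simp [pvScanA]
  | cons c cs ih =>
    simp only [List.foldl_cons, pvStepA, pvScanA]
    by_cases hq : c = '"'
    · simp [hq, ih]
    · simp only [hq, if_false]
      by_cases hcm : (c = ',' && !b) = true
      · have h2 : c = ',' ∧ b = false := by simpa using hcm
        simp [h2.1, h2.2, ih]
      · simp only [hcm]
        simp only [Bool.not_eq_true] at hcm
        simp [ih]

lemma pvGlue_cons_cons (b : Bool) (c : Char) (p : List Char) (ps : List (List Char)) :
    pvGlue b ((c :: p) :: ps) = (if b then c else pvSubst c) :: pvGlue b (p :: ps) := by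
  cases ps with
  | nil => cases b <;> simp [pvGlue]
  | cons q ps => cases b <;> simp [pvGlue]

lemma pv_scan_glue (cs : List Char) (b : Bool) :
    pvScanA cs b = pvGlue b (pvSplit cs) := by
  induction cs generalizing b with
  | nil => cases b <;> simp [pvScanA, pvSplit, pvGlue]
  | cons c cs ih =>
    by_cases hq : c = '"'
    · subst hq
      rcases hsp : pvSplit cs with _ | ⟨q, qs⟩
      · exact absurd hsp (pvSplit_ne_nil cs)
      · simp only [pvScanA, pvSplit, hsp]
        rw [ih (!b), hsp]
        cases b <;> simp [pvGlue]
    · rcases hsp : pvSplit cs with _ | ⟨p, ps⟩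
      · exact absurd hsp (pvSplit_ne_nil cs)
      · have hg := pvGlue_cons_cons b c p ps
        simp only [pvScanA, pvSplit, hq, if_false, hsp, hg]
        by_cases hcm : (c = ',' && !b) = true
        · have h2 : c = ',' ∧ b = false := by simpa using hcm
          simp [h2.1, h2.2, pvSubst, ih, hsp]
        · simp only [hcm]
          have hhead : (if b then c else pvSubst c) = c := by
            cases b with
            | true => simp
            | false =>
              have hc : ¬ c = ',' := by
                intro hc; exact hcm (by simp [hc])
              simp [pvSubst, hc]
          simp [hhead, ih, hsp]

def pvF (b : Bool) (i : Nat) (p : List Char) : List Char :=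
  if (i % 2 == 0) == !b then p.map pvSubst else p

lemma pv_parity (i : Nat) : (((i + 1) % 2 == 0) : Bool) = !(i % 2 == 0) := by
  rcases Nat.mod_two_eq_zero_or_one i with h | h <;> simp [Nat.add_mod, h]

lemma pvF_shift (b : Bool) : (fun i p => pvF b (i + 1) p) = pvF (!b) := by
  funext i p
  simp [pvF, pv_parity]

lemma pv_join_glue (parts : List (List Char)) (b : Bool) :
    PySem.Chars.join ['"'] (parts.mapIdx (pvF b)) = pvGlue b parts := by
  induction parts generalizing b with
  | nil => simp [pvGlue, PySem.Chars.join_nil]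
  | cons p ps ih =>
    rw [List.mapIdx_cons, pvF_shift]
    cases ps with
    | nil =>
      rw [List.mapIdx_nil, PySem.Chars.join_singleton]
      cases b <;> simp [pvF, pvGlue]
    | cons q qs =>
      have hne : (q :: qs).mapIdx (pvF (!b)) = pvF (!b) 0 q :: (qs.mapIdx fun i p => pvF (!b) (i + 1) p) :=
        List.mapIdx_cons
      rw [hne, PySem.Chars.join_cons_cons, ← hne, ih]
      cases b <;> simp [pvF, pvGlue]

lemma pv_portB_fun (i : Nat) (p : List Char) :
    (if i % 2 == 0 then PySem.Chars.replace p [','] [';'] else p) = pvF false i p := by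
  simp [pvF, pv_replace_single]

-- ===== VERDICT (by name: the statement is the Claim_ definition above) =====
theorem clean_formula_py_spec : Claim_equal_clean_formula_py := by
  intro formula _
  unfold Spec_clean_formula_py clean_formula_py clean_formula_py_alt
  apply congrArg String.ofList
  have hfun : (fun (i : Nat) (p : List Char) =>
      if i % 2 == 0 then PySem.Chars.replace p [','] [';'] else p) = pvF false := by
    funext i p; exact pv_portB_fun i p
  rw [pv_fold_rules, pv_collapse_eq_squeeze, pv_foldA, List.nil_append,
    pv_splitOn_single, hfun, pv_join_glue, pv_scan_glue]
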